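-- pv_equiv track=rewrite | github.com/gawdeganesh/Data-Engineering | DSA/Meta DSA/max_num.py | printMaximum
-- ===== SOURCE A (Python) =====
-- def printMaximum(inum):
--     hash_set = [0] * 10
--
--     result = ""
--     for num in str(inum):
--         hash_set[int(num)] += 1
--
--     for num in range(9, -1, -1):
--         if hash_set[num] > 0:
--             result += str(num) * hash_set[num]
--
--     return int(result)
-- ===== SOURCE B (Python) =====
-- def printMaximum(inum):
--     return int("".join(sorted(str(inum), reverse=True)))
-- ===== Notes on version B (the rewrite author's own statement) =====
-- stated objective: idiomatic
-- what changed: Replaces the ten-bucket digit-frequency counting sort (count array built in one loop, result assembled by a descending range loop) with a one-liner that sorts the decimal string's characters in descending order and re-parses them.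
import Mathlib
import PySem

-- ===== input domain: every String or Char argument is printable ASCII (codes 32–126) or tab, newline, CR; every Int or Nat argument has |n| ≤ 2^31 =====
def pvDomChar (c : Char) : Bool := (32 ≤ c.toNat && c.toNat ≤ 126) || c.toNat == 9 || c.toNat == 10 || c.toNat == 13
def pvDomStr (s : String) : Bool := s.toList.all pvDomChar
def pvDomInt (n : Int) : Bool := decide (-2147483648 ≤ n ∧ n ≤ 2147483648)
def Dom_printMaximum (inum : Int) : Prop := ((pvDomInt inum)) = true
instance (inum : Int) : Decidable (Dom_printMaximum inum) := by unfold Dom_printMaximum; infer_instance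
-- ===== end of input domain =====

-- B replaces A's ten-bucket digit counting sort by the idiomatic one-liner
-- int("".join(sorted(str(inum), reverse=True))); equal return values on all inum ≥ 0.

-- ===== PORT A =====
-- Strings handled on the List Char side (PySem convention; exact).
-- `hash_set[int(num)] += 1` reads with pyGetD and writes with List.set at int(num);
-- final int(result) is PySem.Int.ofChars?, whose `.getD 0` is never taken under Pre_.
def printMaximum (inum : Int) : Int :=
  let hs := (PySem.Int.toChars inum).foldl
    (fun h c =>
      h.set ((PySem.Int.ofChars? [c]).getD 0).toNat
        (PySem.List.pyGetD h ((PySem.Int.ofChars? [c]).getD 0) 0 + 1))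
    (List.replicate 10 (0 : Int))
  let result := (PySem.List.pyRange 9 (-1) (-1)).foldl
    (fun r num =>
      if PySem.List.pyGetD hs num 0 > 0 then
        r ++ PySem.List.pyRepeat (PySem.Int.toChars num) (PySem.List.pyGetD hs num 0)
      else r)
    ([] : List Char)
  (PySem.Int.ofChars? result).getD 0

-- ===== PORT B =====
def printMaximum_alt (inum : Int) : Int :=
  (PySem.Int.ofChars? (PySem.List.sorted (PySem.Int.toChars inum) (fun c => c) true)).getD 0

-- ===== PRECONDITION & SPEC =====
-- Pre_ excludes negative inum: there str(inum) starts with '-' and both A's per-character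
-- int(num) and B's final int(...) raise ValueError.
def Pre_printMaximum (inum : Int) : Prop := 0 ≤ inum
instance (inum : Int) : Decidable (Pre_printMaximum inum) := by unfold Pre_printMaximum; infer_instance
def pvWitness_printMaximum : Int := 3041059
def Spec_printMaximum (inum : Int) (out : Int) : Prop := out = printMaximum_alt inum
instance (inum : Int) (out : Int) : Decidable (Spec_printMaximum inum out) := by unfold Spec_printMaximum; infer_instance

-- ===== CLAIM (what is proved, stated in full; the proofs are below) =====
def Claim_equal_printMaximum : Prop := ∀ (inum : Int), Dom_printMaximum inum → Pre_printMaximum inum → Spec_printMaximum inum (printMaximum inum)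

-- ===== LEMMAS AND PROOFS =====

/-- The ten decimal digit characters. -/
def pvDigits : List Char := ['0','1','2','3','4','5','6','7','8','9']

theorem pv_digitChar_mem (k : Nat) (hk : k < 10) : Nat.digitChar k ∈ pvDigits := by
  interval_cases k <;> decide

theorem pv_toDigitsCore_mem (fuel : Nat) : ∀ (n : Nat) (acc : List Char),
    (∀ c ∈ acc, c ∈ pvDigits) → ∀ c ∈ Nat.toDigitsCore 10 fuel n acc, c ∈ pvDigits := by
  induction fuel with
  | zero => intro n acc hacc c hc; exact hacc c (by simpa [Nat.toDigitsCore] using hc)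
  | succ fuel ih =>
    intro n acc hacc c hc
    rw [Nat.toDigitsCore] at hc
    by_cases h0 : n / 10 = 0
    · simp only [h0] at hc
      rcases List.mem_cons.mp hc with h | h
      · exact h ▸ pv_digitChar_mem _ (Nat.mod_lt _ (by norm_num))
      · exact hacc c h
    · simp only [if_neg h0] at hc
      exact ih _ _ (by
        intro c' hc'
        rcases List.mem_cons.mp hc' with h | h
        · exact h ▸ pv_digitChar_mem _ (Nat.mod_lt _ (by norm_num))
        · exact hacc c' h) c hc

theorem pv_toChars_mem (n : Int) (hn : 0 ≤ n) : ∀ c ∈ PySem.Int.toChars n, c ∈ pvDigits := by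
  intro c hc
  rw [PySem.Int.toChars, if_neg (by omega)] at hc
  exact pv_toDigitsCore_mem _ _ _ (by simp) c hc

theorem pv_toChars_small (m : Int) (h0 : 0 ≤ m) (h9 : m < 10) :
    PySem.Int.toChars m = [Nat.digitChar m.toNat] := by
  rw [PySem.Int.toChars, if_neg (by omega)]
  have hm : m.toNat < 10 := by omega
  rw [Nat.toDigits, Nat.toDigitsCore, if_pos (Nat.div_eq_of_lt hm), Nat.mod_eq_of_lt hm]

/-- Every digit character is some `Nat.digitChar k`, `k < 10`, and `int(c)` parses to `k`. -/
theorem pv_digit_spec (c : Char) (hc : c ∈ pvDigits) :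
    ∃ k : Nat, k < 10 ∧ c = Nat.digitChar k ∧ (PySem.Int.ofChars? [c]).getD 0 = (k : Int) := by
  fin_cases hc
  · exact ⟨0, by decide, by decide, by decide⟩
  · exact ⟨1, by decide, by decide, by decide⟩
  · exact ⟨2, by decide, by decide, by decide⟩
  · exact ⟨3, by decide, by decide, by decide⟩
  · exact ⟨4, by decide, by decide, by decide⟩
  · exact ⟨5, by decide, by decide, by decide⟩
  · exact ⟨6, by decide, by decide, by decide⟩
  · exact ⟨7, by decide, by decide, by decide⟩
  · exact ⟨8, by decide, by decide, by decide⟩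
  · exact ⟨9, by decide, by decide, by decide⟩

theorem pv_digitChar_inj (a b : Nat) (ha : a < 10) (hb : b < 10) :
    Nat.digitChar a = Nat.digitChar b ↔ a = b := by
  interval_cases a <;> interval_cases b <;> simp_all <;> decide

theorem pv_digitChar_mono (a b : Nat) (ha : a < 10) (hb : b < 10) (hab : a ≤ b) :
    Nat.digitChar a ≤ Nat.digitChar b := by
  interval_cases a <;> interval_cases b <;> decide

/-- A's counting loop computes, in bucket `d`, the old value plus the count of digit `d`. -/
theorem pv_fold_getD (d : Nat) (hd : d < 10) (ds : List Char)
    (hds : ∀ c ∈ ds, c ∈ pvDigits) : ∀ (h : List Int), h.length = 10 →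
    (ds.foldl (fun h c =>
      h.set ((PySem.Int.ofChars? [c]).getD 0).toNat
        (PySem.List.pyGetD h ((PySem.Int.ofChars? [c]).getD 0) 0 + 1)) h).getD d 0
    = h.getD d 0 + (ds.count (Nat.digitChar d) : Int) := by
  induction ds with
  | nil => intro h _; simp
  | cons c t ih =>
    intro h hlen
    obtain ⟨k, hk, hck, hofs⟩ := pv_digit_spec c (hds c List.mem_cons_self)
    rw [List.foldl_cons, ih (fun c' hc' => hds c' (List.mem_cons_of_mem _ hc'))
      _ (by rw [List.length_set]; exact hlen)]
    rw [hofs, Int.toNat_natCast, PySem.List.pyGetD_natCast]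
    have hkl : k < h.length := by omega
    by_cases hdk : d = k
    · subst hdk
      rw [List.getD_eq_getElem?_getD, List.getElem?_set_self hkl, hck, List.count_cons_self]
      simp only [Option.getD_some]
      push_cast
      ring
    · rw [List.getD_eq_getElem?_getD, List.getElem?_set_ne (Ne.symm hdk),
        List.count_cons_of_ne (by
          rw [hck]
          intro hE
          exact hdk ((pv_digitChar_inj d k hd hk).mp hE.symm)),
        ← List.getD_eq_getElem?_getD]

/-- A's output loop is the concatenation of the descending digit blocks. -/
theorem pv_resultA (hs : List Int) :
    (PySem.List.pyRange 9 (-1) (-1)).foldl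
      (fun r num =>
        if PySem.List.pyGetD hs num 0 > 0 then
          r ++ PySem.List.pyRepeat (PySem.Int.toChars num) (PySem.List.pyGetD hs num 0)
        else r)
      ([] : List Char)
    = ([9,8,7,6,5,4,3,2,1,0] : List Int).flatMap
        (fun num => List.replicate (PySem.List.pyGetD hs num 0).toNat (Nat.digitChar num.toNat)) := by
  have hr : PySem.List.pyRange 9 (-1) (-1) = [9,8,7,6,5,4,3,2,1,0] := by decide
  rw [hr]
  rw [PySem.List.foldl_congr_mem _ _
    (fun r num => r ++ List.replicate (PySem.List.pyGetD hs num 0).toNat (Nat.digitChar num.toNat)) _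
    (by
      intro r num hmem
      dsimp only
      have hnum : 0 ≤ num ∧ num < 10 := by fin_cases hmem <;> exact ⟨by norm_num, by norm_num⟩
      by_cases hpos : PySem.List.pyGetD hs num 0 > 0
      · rw [if_pos hpos, pv_toChars_small num hnum.1 hnum.2, PySem.List.pyRepeat_singleton]
      · rw [if_neg hpos, Int.toNat_of_nonpos (by omega), List.replicate_zero, List.append_nil])]
  rw [PySem.List.foldl_append_eq_flatMap]
  rw [List.nil_append]

/-- Descending blocks of equal characters are pairwise ≥. -/
theorem pv_blocks_pairwise (k : Nat → Nat) : ∀ (l : List Nat), l.Pairwise (· > ·) →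
    (∀ d ∈ l, d < 10) →
    (l.flatMap fun d => List.replicate (k d) (Nat.digitChar d)).Pairwise
      (fun a b : Char => b ≤ a) := by
  intro l
  induction l with
  | nil => intro _ _; simp
  | cons d t ih =>
    intro hp h10
    rw [List.flatMap_cons, List.pairwise_append]
    refine ⟨List.pairwise_replicate.mpr (Or.inr le_rfl),
      ih (List.pairwise_cons.mp hp).2 (fun d' hd' => h10 d' (List.mem_cons_of_mem _ hd')), ?_⟩
    intro a ha b hb
    obtain ⟨d', hd't, hb'⟩ := List.mem_flatMap.mp hb
    rw [List.eq_of_mem_replicate ha, List.eq_of_mem_replicate hb']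
    exact pv_digitChar_mono d' d (h10 d' (List.mem_cons_of_mem _ hd't))
      (h10 d List.mem_cons_self)
      (le_of_lt ((List.pairwise_cons.mp hp).1 d' hd't))

/-- Counting-sort output equals Python's descending sort, for digit-only lists. -/
theorem pv_main (ds : List Char) (hds : ∀ c ∈ ds, c ∈ pvDigits) :
    ([9,8,7,6,5,4,3,2,1,0] : List Nat).flatMap
      (fun d => List.replicate (ds.count (Nat.digitChar d)) (Nat.digitChar d))
    = PySem.List.sorted ds (fun c => c) true := by
  have hperm : (([9,8,7,6,5,4,3,2,1,0] : List Nat).flatMap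
      (fun d => List.replicate (ds.count (Nat.digitChar d)) (Nat.digitChar d))).Perm ds := by
    rw [List.perm_iff_count]
    intro a
    simp only [List.flatMap_cons, List.flatMap_nil, List.count_append,
      List.count_replicate, List.append_nil]
    by_cases ha : a ∈ pvDigits
    · fin_cases ha <;>
        · simp only [show Nat.digitChar 9 = '9' from rfl, show Nat.digitChar 8 = '8' from rfl,
            show Nat.digitChar 7 = '7' from rfl, show Nat.digitChar 6 = '6' from rfl,
            show Nat.digitChar 5 = '5' from rfl, show Nat.digitChar 4 = '4' from rfl,
            show Nat.digitChar 3 = '3' from rfl, show Nat.digitChar 2 = '2' from rfl,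
            show Nat.digitChar 1 = '1' from rfl, show Nat.digitChar 0 = '0' from rfl]
          simp
    · have h0 : ds.count a = 0 := List.count_eq_zero.mpr (fun hmem => ha (hds a hmem))
      simp only [pvDigits, List.mem_cons, List.not_mem_nil, or_false, not_or] at ha
      obtain ⟨h1, h2, h3, h4, h5, h6, h7, h8, h9, h10⟩ := ha
      rw [h0]
      simp only [beq_iff_eq, show Nat.digitChar 9 = '9' from rfl, show Nat.digitChar 8 = '8' from rfl,
        show Nat.digitChar 7 = '7' from rfl, show Nat.digitChar 6 = '6' from rfl,
        show Nat.digitChar 5 = '5' from rfl, show Nat.digitChar 4 = '4' from rfl,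
        show Nat.digitChar 3 = '3' from rfl, show Nat.digitChar 2 = '2' from rfl,
        show Nat.digitChar 1 = '1' from rfl, show Nat.digitChar 0 = '0' from rfl]
      simp [Ne.symm h1, Ne.symm h2, Ne.symm h3, Ne.symm h4, Ne.symm h5, Ne.symm h6,
        Ne.symm h7, Ne.symm h8, Ne.symm h9, Ne.symm h10]
  have hpair := pv_blocks_pairwise (fun d => ds.count (Nat.digitChar d)) [9,8,7,6,5,4,3,2,1,0]
    (by decide) (by decide)
  refine List.reverse_inj.mp (PySem.List.eq_of_perm_of_pairwise_le_of_injective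
    (fun c : Char => c) (fun a b h => h) ?_ ?_ ?_)
  · exact ((List.reverse_perm _).trans hperm).trans
      ((PySem.List.sorted_perm ds (fun c => c) true).symm.trans (List.reverse_perm _).symm)
  · exact List.pairwise_reverse.mpr hpair
  · exact List.pairwise_reverse.mpr (PySem.List.sorted_pairwise_rev ds (fun c => c))

-- ===== VERDICT (by name: the statement is the Claim_ definition above) =====
theorem printMaximum_spec : Claim_equal_printMaximum := by
  intro inum _ hpre
  unfold Spec_printMaximum printMaximum printMaximum_alt
  simp only []
  have hds := pv_toChars_mem inum hpre
  rw [pv_resultA]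
  have hcnt : ∀ d : Nat, d < 10 →
      ((PySem.Int.toChars inum).foldl (fun h c =>
        h.set ((PySem.Int.ofChars? [c]).getD 0).toNat
          (PySem.List.pyGetD h ((PySem.Int.ofChars? [c]).getD 0) 0 + 1))
        (List.replicate 10 (0 : Int))).getD d 0
      = ((PySem.Int.toChars inum).count (Nat.digitChar d) : Int) := by
    intro d hd
    rw [pv_fold_getD d hd _ hds _ (by simp)]
    interval_cases d <;> simp
  rw [← pv_main _ hds]
  simp only [List.flatMap_cons, List.flatMap_nil, PySem.List.pyGetD_ofNat']
  rw [hcnt 9 (by norm_num), hcnt 8 (by norm_num), hcnt 7 (by norm_num), hcnt 6 (by norm_num),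
    hcnt 5 (by norm_num), hcnt 4 (by norm_num), hcnt 3 (by norm_num), hcnt 2 (by norm_num),
    hcnt 1 (by norm_num), hcnt 0 (by norm_num)]
  simp
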